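-- pv_equiv track=rewrite | github.com/davidkhala/tpc_benchmark | h_setup.py | std_out_filter
-- ===== SOURCE A (Python) =====
-- def std_out_filter(std_out):
--     """Filter off the beginning cruft of a std_out query
--     generated by qgen"""
--
--     std_out = std_out.split("\n")
--     std_out_new = []
--     keep = False
--     for line in std_out:
--         line = line.rstrip("\r")
--         line = line.rstrip("\n")
--         if line[:6] in ["select", "create"]:
--             keep = True
--         if keep:
--             std_out_new.append(line)
--     std_out = std_out_new
--     std_out = "\n".join(std_out)
--     return std_out
-- ===== SOURCE B (Python) =====
-- def std_out_filter(std_out):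
--     """Filter off the beginning cruft of a std_out query
--     generated by qgen"""
--     lines = std_out.split("\n")
--     tail = 0
--     count = 0
--     for raw in reversed(lines):
--         count += 1
--         if raw.rstrip("\r").rstrip("\n")[:6] in ("select", "create"):
--             tail = count
--     if tail == 0:
--         return ""
--     return "\n".join(l.rstrip("\r").rstrip("\n") for l in lines[len(lines) - tail:])
-- ===== Notes on version B (the rewrite author's own statement) =====
-- stated objective: alternative
-- what changed: Replaces A's forward stateful keep-flag loop that appends line by line with a backward traversal: scan the lines in reverse counting them and recording the suffix length at each select/create line, then join the normalized tail slice of that length (empty string if the length stays 0).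
import Mathlib
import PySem

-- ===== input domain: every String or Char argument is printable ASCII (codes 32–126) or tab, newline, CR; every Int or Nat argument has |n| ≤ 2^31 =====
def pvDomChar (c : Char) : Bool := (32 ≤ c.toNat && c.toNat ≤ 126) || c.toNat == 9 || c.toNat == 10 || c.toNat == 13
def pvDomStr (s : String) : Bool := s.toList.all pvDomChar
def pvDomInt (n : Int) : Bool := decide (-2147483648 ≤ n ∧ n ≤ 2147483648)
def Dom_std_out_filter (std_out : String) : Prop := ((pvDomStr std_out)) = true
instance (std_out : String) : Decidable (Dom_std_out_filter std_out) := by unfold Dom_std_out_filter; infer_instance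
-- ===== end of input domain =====

-- B replaces A's forward keep-flag loop with a backward scan over the lines that computes the
-- length of the suffix starting at the first select/create line, then joins that slice (objective: alternative).


-- ===== PORT A =====
-- line.rstrip("\r") / line.rstrip("\n"): drop the given char from the right end (exact:
-- Python rstrip with a one-char argument removes all trailing occurrences of that char).
def pvRstripCR (cs : List Char) : List Char := (cs.reverse.dropWhile (fun c => c == '\r')).reverse

def pvRstripLF (cs : List Char) : List Char := (cs.reverse.dropWhile (fun c => c == '\n')).reverse

-- line[:6] in ["select", "create"]
def pvIsQuery (cs : List Char) : Bool :=
  decide (PySem.Chars.slice cs none (some 6) = "select".toList ∨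
          PySem.Chars.slice cs none (some 6) = "create".toList)

-- the body of A's for-loop over state (keep, std_out_new)
def pvStep (st : Bool × List (List Char)) (line : List Char) : Bool × List (List Char) :=
  let line := pvRstripCR line
  let line := pvRstripLF line
  let keep := if pvIsQuery line then true else st.1
  (keep, if keep then st.2 ++ [line] else st.2)

def std_out_filter (std_out : String) : String :=
  let lines := PySem.Chars.splitOn std_out.toList ['\n']
  let res := lines.foldl pvStep (false, [])
  String.ofList (PySem.Chars.join ['\n'] res.2)

-- ===== PORT B =====
-- raw.rstrip("\r").rstrip("\n") (B's normalization, same as A's)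
def pvNorm (l : List Char) : List Char := pvRstripLF (pvRstripCR l)

-- the body of B's backward loop over state (tail, count)
def pvTailStep (st : Nat × Nat) (raw : List Char) : Nat × Nat :=
  let count := st.2 + 1
  (if pvIsQuery (pvNorm raw) then count else st.1, count)

def std_out_filter_alt (std_out : String) : String :=
  let lines := PySem.Chars.splitOn std_out.toList ['\n']
  let r := lines.reverse.foldl pvTailStep (0, 0)
  if r.1 = 0 then ""
  else String.ofList (PySem.Chars.join ['\n']
    ((PySem.List.slice lines (some ((lines.length : Int) - (r.1 : Int))) none).map pvNorm))

-- ===== PRECONDITION & SPEC =====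
def Spec_std_out_filter (std_out : String) (out : String) : Prop := out = std_out_filter_alt std_out
instance (std_out : String) (out : String) : Decidable (Spec_std_out_filter std_out out) := by unfold Spec_std_out_filter; infer_instance

-- ===== CLAIM (what is proved, stated in full; the proofs are below) =====
def Claim_equal_std_out_filter : Prop := ∀ (std_out : String), Dom_std_out_filter std_out → Spec_std_out_filter std_out (std_out_filter std_out)

-- ===== LEMMAS AND PROOFS =====

theorem pvStep_true (acc : List (List Char)) (l : List Char) :
    pvStep (true, acc) l = (true, acc ++ [pvNorm l]) := by
  simp [pvStep, pvNorm]

theorem pvStep_false (acc : List (List Char)) (l : List Char) :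
    pvStep (false, acc) l =
      if pvIsQuery (pvNorm l) then (true, acc ++ [pvNorm l]) else (false, acc) := by
  by_cases h : pvIsQuery (pvNorm l) <;> simp [pvStep, pvNorm] <;> simp [pvNorm] at h <;> simp [h]

-- once keep = true, A appends every remaining normalized line
theorem pvFoldl_keep (ls : List (List Char)) (acc : List (List Char)) :
    ls.foldl pvStep (true, acc) = (true, acc ++ ls.map pvNorm) := by
  induction ls generalizing acc with
  | nil => simp
  | cons l ls ih => simp [pvStep_true, ih]

-- with keep = false, A's fold is characterized by the pivot index of the normalized lines
theorem pvFoldl_pivot (ls : List (List Char)) (acc : List (List Char)) :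
    ls.foldl pvStep (false, acc)
    = match (ls.map pvNorm).findIdx? pvIsQuery with
      | none => (false, acc)
      | some i => (true, acc ++ (ls.map pvNorm).drop i) := by
  induction ls generalizing acc with
  | nil => simp
  | cons l ls ih =>
    simp only [List.foldl_cons, List.map_cons, List.findIdx?_cons, pvStep_false]
    by_cases h : pvIsQuery (pvNorm l)
    · simp [h, pvFoldl_keep]
    · simp only [h, Bool.false_eq_true, ite_false]
      rw [ih acc]
      cases (ls.map pvNorm).findIdx? pvIsQuery with
      | none => simp
      | some i => simp

-- B's backward fold computes (length - first match index) as the tail length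
theorem pvFoldl_tail (ls : List (List Char)) (t0 c0 : Nat) :
    ls.reverse.foldl pvTailStep (t0, c0)
    = match (ls.map pvNorm).findIdx? pvIsQuery with
      | none => (t0, c0 + ls.length)
      | some i => (c0 + ls.length - i, c0 + ls.length) := by
  induction ls generalizing t0 c0 with
  | nil => simp
  | cons l ls ih =>
    simp only [List.reverse_cons, List.foldl_append, List.foldl_cons, List.foldl_nil,
      List.map_cons, List.findIdx?_cons, ih]
    by_cases h : pvIsQuery (pvNorm l)
    · cases hf : (ls.map pvNorm).findIdx? pvIsQuery with
      | none => simp [pvTailStep, h, Nat.add_assoc]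
      | some i => simp [pvTailStep, h]; omega
    · cases hf : (ls.map pvNorm).findIdx? pvIsQuery with
      | none => simp [pvTailStep, h]; omega
      | some i =>
        have hi : i < ls.length := by
          have := List.findIdx?_eq_some_iff_findIdx_eq.mp hf
          simpa using this.1
        simp [pvTailStep, h]; constructor <;> omega

-- ===== VERDICT (by name: the statement is the Claim_ definition above) =====
theorem std_out_filter_spec : Claim_equal_std_out_filter := by
  intro std_out _
  unfold Spec_std_out_filter std_out_filter std_out_filter_alt
  simp only []
  rw [pvFoldl_pivot, pvFoldl_tail]
  cases hf : ((PySem.Chars.splitOn std_out.toList ['\n']).map pvNorm).findIdx? pvIsQuery with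
  | none => simp [PySem.Chars.join, List.intercalate]
  | some i =>
    set ls := PySem.Chars.splitOn std_out.toList ['\n'] with hls
    have hi : i < ls.length := by
      have := List.findIdx?_eq_some_iff_findIdx_eq.mp hf
      simpa using this.1
    have htail : 0 + ls.length - i ≠ 0 := by omega
    simp only [htail, if_false]
    have hcast : ((ls.length : Int) - ((0 + ls.length - i : Nat) : Int)) = ((i : Nat) : Int) := by
      omega
    rw [hcast, PySem.List.slice_from_natCast]
    simp [List.map_drop]
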